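-- pv_equiv track=rewrite | github.com/sandialabs/pyGSTi | pygsti/objects/mapevalstrategy.py | _create_prefix_table
-- ===== SOURCE A (Python) =====
-- import collections as _collections
--
-- def _create_prefix_table(circuits_to_evaluate, max_cache_size):
--     """
--     Creates a "prefix table" for evaluating a set of circuits.
--
--     The table is list of tuples, where each element contains
--     instructions for evaluating a particular operation sequence:
--
--     (iDest, iStart, tuple_of_following_items, iCache)
--
--     Means that circuit[iDest] = cached_circuit[iStart] + tuple_of_following_items,
--     and that the resulting state should be stored at cache index iCache (for
--     later reference as an iStart value).  The ordering of the returned list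
--     specifies the evaluation order.
--
--     `iDest` is always in the range [0,len(circuits_to_evaluate)-1], and
--     indexes the result computed for each of the circuits.
--
--     Returns
--     -------
--     tuple
--         A tuple of `(table_contents, cache_size)` where `table_contents` is a list
--         of tuples as given above and `cache_size` is the total size of the state
--         cache used to hold intermediate results.
--     """
--     #Sort the operation sequences "alphabetically", so that it's trivial to find common prefixes
--     sorted_circuits_to_evaluate = sorted(list(enumerate(circuits_to_evaluate)), key=lambda x: x[1])
--
--     if max_cache_size is None or max_cache_size > 0:
--         #CACHE assessment pass: figure out what's worth keeping in the cache.
--         # In this pass, we cache *everything* and keep track of how many times each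
--         # original index (after it's cached) is utilized as a prefix for another circuit.
--         # Not: this logic could be much better, e.g. computing a cost savings for each
--         #  potentially-cached item and choosing the best ones, and proper accounting
--         #  for chains of cached items.
--         cacheIndices = []  # indices into circuits_to_evaluate of the results to cache
--         cache_hits = _collections.defaultdict(lambda: 0)
--         for i, circuit in sorted_circuits_to_evaluate:
--             L = len(circuit)
--             for cached_index in reversed(cacheIndices):
--                 candidate = circuits_to_evaluate[cached_index]
--                 Lc = len(candidate)
--                 if L >= Lc > 0 and circuit[0:Lc] == candidate:  # a cache hit!
--                     cache_hits[cached_index] += 1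
--                     break  # stop looking through cache
--             cacheIndices.append(i)  # cache *everything* in this pass
--
--     # Build prefix table: construct list, only caching items with hits > 0 (up to max_cache_size)
--     cacheIndices = []  # indices into circuits_to_evaluate of the results to cache
--     table_contents = []
--     curCacheSize = 0
--
--     for i, circuit in sorted_circuits_to_evaluate:
--         L = len(circuit)
--
--         #find longest existing prefix for circuit by working backwards
--         # and finding the first string that *is* a prefix of this string
--         # (this will necessarily be the longest prefix, given the sorting)
--         for i_in_cache in range(curCacheSize - 1, -1, -1):  # from curCacheSize-1 -> 0
--             candidate = circuits_to_evaluate[cacheIndices[i_in_cache]]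
--             Lc = len(candidate)
--             if L >= Lc > 0 and circuit[0:Lc] == candidate:  # ">=" allows for duplicates
--                 iStart = i_in_cache  # an index into the *cache*, not into circuits_to_evaluate
--                 remaining = circuit[Lc:]
--                 break
--         else:  # no break => no prefix
--             iStart = None
--             remaining = circuit[:]
--
--         # if/where this string should get stored in the cache
--         if (max_cache_size is None or curCacheSize < max_cache_size) and cache_hits.get(i, 0) > 0:
--             iCache = len(cacheIndices)
--             cacheIndices.append(i); curCacheSize += 1
--         else:  # don't store in the cache
--             iCache = None
--
--         #Add instruction for computing this circuit
--         table_contents.append((i, iStart, remaining, iCache))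
--
--     #FUTURE: could perform a second pass, and if there is
--     # some threshold number of elements which share the
--     # *same* iStart and the same beginning of the
--     # 'remaining' part then add a new "extra" element
--     # (beyond the #circuits index) which computes
--     # the shared prefix and insert this into the eval
--     # order.
--
--     return table_contents, curCacheSize
-- ===== SOURCE B (Python) =====
-- def _create_prefix_table(circuits_to_evaluate, max_cache_size):
--     """Stack-based re-implementation: the sorted order makes all cached prefixes of a
--     circuit form a nested chain, so a stack of nested prefixes (popping entries that are
--     not prefixes of the current circuit) yields the longest prefix in amortized O(1)."""
--     sorted_circuits_to_evaluate = sorted(enumerate(circuits_to_evaluate), key=lambda x: x[1])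
--
--     cache_hits = {}
--     if max_cache_size is None or max_cache_size > 0:
--         # assessment pass: count, for every circuit, a hit on its longest nonempty
--         # previously-seen prefix; the stack top after popping is exactly that prefix.
--         stack = []  # entries (original_index, circuit); each entry's circuit is below a later one
--         for i, circuit in sorted_circuits_to_evaluate:
--             while stack and not _is_nonempty_prefix(stack[-1][1], circuit):
--                 stack.pop()
--             if stack:
--                 k = stack[-1][0]
--                 cache_hits[k] = cache_hits.get(k, 0) + 1
--             if circuit:
--                 stack.append((i, circuit))
--
--     table_contents = []
--     stack = []  # entries (cache_index, circuit) for circuits actually cached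
--     cur_cache_size = 0
--     for i, circuit in sorted_circuits_to_evaluate:
--         while stack and not _is_nonempty_prefix(stack[-1][1], circuit):
--             stack.pop()
--         if stack:
--             iStart = stack[-1][0]
--             remaining = circuit[len(stack[-1][1]):]
--         else:
--             iStart = None
--             remaining = list(circuit)
--         if (max_cache_size is None or cur_cache_size < max_cache_size) \
--            and cache_hits.get(i, 0) > 0:
--             iCache = cur_cache_size
--             stack.append((iCache, circuit))
--             cur_cache_size += 1
--         else:
--             iCache = None
--         table_contents.append((i, iStart, remaining, iCache))
--
--     return table_contents, cur_cache_size
--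
--
-- def _is_nonempty_prefix(p, c):
--     return len(p) > 0 and c[:len(p)] == p
-- ===== Notes on version B (the rewrite author's own statement) =====
-- stated objective: faster
-- what changed: Both passes' per-circuit backward scan over the whole cache (O(n) candidates each, prefix-compared) is replaced by a stack of nested cached prefixes: entries that are not prefixes of the current circuit are popped once and for all (valid because the circuits are processed in lexicographic order), so the longest cached prefix is found at the stack top in amortized O(1) comparisons.
import Mathlib
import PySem

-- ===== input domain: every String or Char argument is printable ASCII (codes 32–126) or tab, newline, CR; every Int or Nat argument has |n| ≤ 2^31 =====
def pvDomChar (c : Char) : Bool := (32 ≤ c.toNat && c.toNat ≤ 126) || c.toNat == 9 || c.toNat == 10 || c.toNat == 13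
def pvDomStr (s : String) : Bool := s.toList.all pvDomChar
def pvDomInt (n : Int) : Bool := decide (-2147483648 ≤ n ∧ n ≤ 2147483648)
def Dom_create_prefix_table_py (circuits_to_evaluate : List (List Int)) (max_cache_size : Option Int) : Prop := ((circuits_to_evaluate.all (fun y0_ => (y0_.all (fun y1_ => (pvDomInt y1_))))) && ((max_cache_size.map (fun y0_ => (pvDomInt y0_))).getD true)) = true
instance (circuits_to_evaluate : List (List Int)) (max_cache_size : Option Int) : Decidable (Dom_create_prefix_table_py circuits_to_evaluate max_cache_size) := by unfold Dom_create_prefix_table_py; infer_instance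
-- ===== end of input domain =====

-- B replaces A's per-circuit backward scan over the whole cache with a stack of nested
-- cached prefixes (pop non-prefixes, top = longest prefix), same return value, amortized
-- linear scanning instead of quadratic.

-- ===== PORT A =====

-- 'L >= Lc > 0 and circuit[0:Lc] == candidate'
def condA (circuit candidate : List Int) : Bool :=
  decide ((circuit.length : Int) ≥ (candidate.length : Int)) &&
  decide ((0 : Int) < (candidate.length : Int)) &&
  (PySem.List.slice circuit (some 0) (some (candidate.length : Int)) == candidate)

-- pass-1 inner loop: 'for cached_index in reversed(cacheIndices): … break'
-- (cached_index is always a valid index into circuits on reachable states, hence .getD [])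
def pass1ScanA (circuits : List (List Int)) (cacheIndices : List Int) (circuit : List Int) : Option Int :=
  cacheIndices.reverse.find? (fun cached_index =>
    condA circuit ((PySem.List.pyGet? circuits cached_index).getD []))

-- the CACHE-assessment loop body (caches everything, counts hits)
def cacheHitsLoopA (circuits : List (List Int)) (sortedC : List (Int × List Int)) :
    List Int × PySem.Dict Int Int :=
  sortedC.foldl (fun st p =>
    let hits := match pass1ScanA circuits st.1 p.2 with
      | some cached_index => st.2.modify cached_index 0 (· + 1)   -- cache_hits[cached_index] += 1 (defaultdict 0)
      | none => st.2
    (st.1 ++ [p.1], hits)) ([], PySem.Dict.empty)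

-- 'if max_cache_size is None or max_cache_size > 0: …'; when skipped, Python never
-- evaluates cache_hits later (short-circuit), so the empty dict is value-faithful
def cacheHitsA (circuits : List (List Int)) (max_cache_size : Option Int)
    (sortedC : List (Int × List Int)) : PySem.Dict Int Int :=
  match max_cache_size with
  | none => (cacheHitsLoopA circuits sortedC).2
  | some m => if 0 < m then (cacheHitsLoopA circuits sortedC).2 else PySem.Dict.empty

-- 'max_cache_size is None or curCacheSize < max_cache_size'
def cacheRoomA (max_cache_size : Option Int) (curCacheSize : Int) : Bool :=
  match max_cache_size with
  | none => true
  | some m => decide (curCacheSize < m)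

-- pass-2 inner loop: 'for i_in_cache in range(curCacheSize - 1, -1, -1): … break/else'
def findPrefixA (circuits : List (List Int)) (cacheIndices : List Int) (curCacheSize : Int)
    (circuit : List Int) : Option (Int × List Int) :=
  (PySem.List.pyRange (curCacheSize - 1) (-1) (-1)).findSome? (fun i_in_cache =>
    let candidate := (PySem.List.pyGet? circuits
        ((PySem.List.pyGet? cacheIndices i_in_cache).getD 0)).getD []
    if condA circuit candidate then
      some (i_in_cache, PySem.List.slice circuit (some (candidate.length : Int)) none)
    else none)

def create_prefix_table_py (circuits_to_evaluate : List (List Int)) (max_cache_size : Option Int) :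
    (List (Int × Option Int × List Int × Option Int)) × Int :=
  let sortedC := PySem.List.sorted (PySem.List.enumerate circuits_to_evaluate 0) (fun x => x.2) false
  let cache_hits := cacheHitsA circuits_to_evaluate max_cache_size sortedC
  let res := sortedC.foldl
    (fun (st : List Int × List (Int × Option Int × List Int × Option Int) × Int) p =>
      let (iStart, remaining) := match findPrefixA circuits_to_evaluate st.1 st.2.2 p.2 with
        | some sr => (some sr.1, sr.2)
        | none => ((none : Option Int), PySem.List.slice p.2 none none)   -- circuit[:]
      if cacheRoomA max_cache_size st.2.2 && decide (cache_hits.getD p.1 0 > 0) then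
        (st.1 ++ [p.1], st.2.1 ++ [(p.1, iStart, remaining, some (st.1.length : Int))], st.2.2 + 1)
      else
        (st.1, st.2.1 ++ [(p.1, iStart, remaining, none)], st.2.2))
    ([], [], 0)
  (res.2.1, res.2.2)

-- ===== PORT B =====

-- Source B _is_nonempty_prefix
def isNonemptyPrefixB (p c : List Int) : Bool :=
  decide ((0 : Int) < (p.length : Int)) &&
  (PySem.List.slice c (some 0) (some (p.length : Int)) == p)

-- 'while stack and not _is_nonempty_prefix(stack[-1][1], circuit): stack.pop()'
-- (the stack's head is Python's stack[-1])
def popB (stack : List (Int × List Int)) (circuit : List Int) : List (Int × List Int) :=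
  stack.dropWhile (fun q => ! isNonemptyPrefixB q.2 circuit)

-- B's assessment pass over the sorted circuits
def pass1B (sortedC : List (Int × List Int)) : PySem.Dict Int Int :=
  (sortedC.foldl (fun (st : List (Int × List Int) × PySem.Dict Int Int) p =>
     let stack := popB st.1 p.2
     let hits := match stack with
       | q :: _ => st.2.insert q.1 (st.2.getD q.1 0 + 1)   -- cache_hits[k] = cache_hits.get(k, 0) + 1
       | [] => st.2
     (if p.2.isEmpty then stack else (p.1, p.2) :: stack, hits)) ([], PySem.Dict.empty)).2

def cacheHitsB (max_cache_size : Option Int) (sortedC : List (Int × List Int)) :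
    PySem.Dict Int Int :=
  match max_cache_size with
  | none => pass1B sortedC
  | some m => if 0 < m then pass1B sortedC else PySem.Dict.empty

-- 'max_cache_size is None or cur_cache_size < max_cache_size'
def cacheRoomB (max_cache_size : Option Int) (curCacheSize : Int) : Bool :=
  match max_cache_size with
  | none => true
  | some m => decide (curCacheSize < m)

def create_prefix_table_py_alt (circuits_to_evaluate : List (List Int)) (max_cache_size : Option Int) :
    (List (Int × Option Int × List Int × Option Int)) × Int :=
  let sortedC := PySem.List.sorted (PySem.List.enumerate circuits_to_evaluate 0) (fun x => x.2) false
  let cache_hits := cacheHitsB max_cache_size sortedC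
  let res := sortedC.foldl
    (fun (st : List (Int × List Int) × List (Int × Option Int × List Int × Option Int) × Int) p =>
      let stack := popB st.1 p.2
      let (iStart, remaining) := match stack with
        | q :: _ => (some q.1, PySem.List.slice p.2 (some (q.2.length : Int)) none)  -- circuit[len(stack[-1][1]):]
        | [] => ((none : Option Int), p.2)   -- list(circuit)
      if cacheRoomB max_cache_size st.2.2 && decide (cache_hits.getD p.1 0 > 0) then
        ((st.2.2, p.2) :: stack, st.2.1 ++ [(p.1, iStart, remaining, some st.2.2)], st.2.2 + 1)
      else
        (stack, st.2.1 ++ [(p.1, iStart, remaining, none)], st.2.2))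
    ([], [], 0)
  (res.2.1, res.2.2)

-- ===== PRECONDITION & SPEC =====
def Spec_create_prefix_table_py (circuits_to_evaluate : List (List Int)) (max_cache_size : Option Int) (out : (List (Int × Option Int × List Int × Option Int)) × Int) : Prop := out = create_prefix_table_py_alt circuits_to_evaluate max_cache_size
instance (circuits_to_evaluate : List (List Int)) (max_cache_size : Option Int) (out : (List (Int × Option Int × List Int × Option Int)) × Int) : Decidable (Spec_create_prefix_table_py circuits_to_evaluate max_cache_size out) := by unfold Spec_create_prefix_table_py; infer_instance

-- ===== CLAIM (what is proved, stated in full; the proofs are below) =====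
def Claim_equal_create_prefix_table_py : Prop := ∀ (circuits_to_evaluate : List (List Int)) (max_cache_size : Option Int), Dom_create_prefix_table_py circuits_to_evaluate max_cache_size → Spec_create_prefix_table_py circuits_to_evaluate max_cache_size (create_prefix_table_py circuits_to_evaluate max_cache_size)

-- ===== LEMMAS AND PROOFS =====

-- the shared prefix test, as a Prop-valued predicate on (payload, circuit) pairs
def prefQ (c : List Int) (q : Int × List Int) : Bool := decide (q.2 ≠ [] ∧ q.2 <+: c)

theorem condA_eq (c cand : List Int) : condA c cand = prefQ c ((0 : Int), cand) := by
  simp only [condA, prefQ, PySem.List.slice_zero_start, PySem.List.slice_to_natCast]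
  rw [Bool.eq_iff_iff]
  simp only [Bool.and_eq_true, decide_eq_true_eq, ge_iff_le, beq_iff_eq]
  constructor
  · rintro ⟨⟨h1, h2⟩, h3⟩
    refine ⟨by intro h; simp [h] at h2, ?_⟩
    exact List.prefix_iff_eq_take.mpr h3.symm
  · rintro ⟨h1, h2⟩
    have hl := h2.length_le
    refine ⟨⟨by exact_mod_cast hl, by simpa [List.length_pos_iff] using h1⟩, (List.prefix_iff_eq_take.mp h2).symm⟩

theorem find?_congr_mem {α : Type} {l : List α} {p q : α → Bool}
    (h : ∀ x ∈ l, p x = q x) : l.find? p = l.find? q := by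
  induction l with
  | nil => rfl
  | cons x xs ih =>
    simp only [List.find?_cons]
    rw [h x (by simp)]
    cases hq : q x
    · exact ih (fun y hy => h y (by simp [hy]))
    · rfl

theorem findSome?_if_eq_find?_map {α β : Type} (l : List α) (p : α → Bool) (g : α → β) :
    l.findSome? (fun x => if p x then some (g x) else none) = (l.find? p).map g := by
  induction l with
  | nil => rfl
  | cons x xs ih =>
    simp only [List.findSome?_cons, List.find?_cons]
    cases hp : p x <;> simp [ih]

theorem find?_sublist_eq {α : Type} {l s : List α} (p : α → Bool) (hnd : l.Nodup)
    (hs : s.Sublist l) (hc : ∀ x ∈ l, p x = true → x ∈ s) : s.find? p = l.find? p := by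
  induction hs with
  | slnil => rfl
  | @cons s' l' a hsub ih =>
    have ha : a ∉ l' := (List.nodup_cons.mp hnd).1
    have hpa : p a = false := by
      cases hp : p a
      · rfl
      · exact absurd (hsub.subset (hc a (by simp) hp)) ha
    rw [List.find?_cons_of_neg (by simp [hpa])]
    exact ih (List.nodup_cons.mp hnd).2 (fun x hx hp => hc x (by simp [hx]) hp)
  | @cons₂ s' l' a hsub ih =>
    simp only [List.find?_cons]
    cases hp : p a
    · refine ih (List.nodup_cons.mp hnd).2 (fun x hx hpx => ?_)
      have ha : a ∉ l' := (List.nodup_cons.mp hnd).1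
      rcases List.mem_cons.mp (hc x (by simp [hx]) hpx) with rfl | h
      · exact absurd hx ha
      · exact h
    · rfl

def StackInv (done : List (List Int)) (prev s : List (Int × List Int)) : Prop :=
  s.Sublist prev.reverse ∧
  (∀ q ∈ prev, q.2 ∈ done) ∧
  (∀ q ∈ prev, ∀ c', (∀ d ∈ done, d ≤ c') → prefQ c' q = true → q ∈ s)

-- lex-order sandwich: a prefix of c that lexicographically brackets x is a prefix of x
theorem prefix_of_le_le : ∀ (p x c : List Int), p <+: c → p ≤ x → x ≤ c → p <+: x
  | [], _, _, _, _, _ => List.nil_prefix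
  | a :: p', [], c, _, h2, _ => absurd ((List.nil_lt_cons a p').trans_le h2) (lt_irrefl _)
  | a :: p', b :: x', c, h1, h2, h3 => by
    obtain ⟨c', rfl, hpc⟩ : ∃ c', c = a :: c' ∧ p' <+: c' := by
      cases c with
      | nil => exact absurd h1 (by simp)
      | cons d c' => obtain ⟨h, h'⟩ := List.cons_prefix_cons.mp h1; exact ⟨c', by rw [h], h'⟩
    rw [← Std.not_lt, List.cons_lt_cons_iff] at h2 h3
    push Not at h2 h3
    have hab : a = b := le_antisymm h2.1 h3.1
    subst hab
    exact List.cons_prefix_cons.mpr ⟨rfl, prefix_of_le_le p' x' c' hpc (h2.2 rfl) (h3.2 rfl)⟩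

theorem stackInv_find (done : List (List Int)) (prev s : List (Int × List Int)) (c : List Int)
    (inv : StackInv done prev s) (hnd : prev.Nodup) (hle : ∀ d ∈ done, d ≤ c) :
    s.find? (prefQ c) = prev.reverse.find? (prefQ c) :=
  find?_sublist_eq _ (List.nodup_reverse.mpr hnd) inv.1
    (fun x hx hp => inv.2.2 x (List.mem_reverse.mp hx) c hle hp)

theorem stackInv_step (done : List (List Int)) (prev s : List (Int × List Int))
    (a : Int) (c : List Int) (appnd push : Bool)
    (inv : StackInv done prev s) (hle : ∀ d ∈ done, d ≤ c)
    (h1 : push = true → appnd = true) (h2 : appnd = true → push = false → c = []) :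
    StackInv (done ++ [c]) (prev ++ (if appnd then [(a, c)] else []))
      ((if push then [(a, c)] else []) ++ s.dropWhile (fun q => ! prefQ c q)) := by
  obtain ⟨hsub, hdone, hcomp⟩ := inv
  have hdrop : (s.dropWhile (fun q => ! prefQ c q)).Sublist s := List.dropWhile_sublist _
  refine ⟨?_, ?_, ?_⟩
  · cases push with
    | false =>
      cases appnd with
      | false => simpa using hdrop.trans hsub
      | true =>
        simp only [if_true, List.reverse_append, List.reverse_cons, List.reverse_nil,
          List.nil_append, List.nil_append]
        exact (hdrop.trans hsub).trans (List.sublist_cons_self _ _)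
    | true =>
      rw [h1 rfl]
      simp only [if_true, List.reverse_append, List.reverse_cons, List.reverse_nil, List.nil_append]
      exact (hdrop.trans hsub).cons₂ _
  · intro q hq
    rcases List.mem_append.mp hq with h | h
    · exact List.mem_append.mpr (Or.inl (hdone q h))
    · cases appnd <;> simp_all
  · intro q hq c' hle' hQ
    have hcc' : c ≤ c' := hle' c (by simp)
    rcases List.mem_append.mp hq with h | h
    · -- q ∈ prev: q is in s, and cannot be in the dropped (takeWhile) part
      have hqs : q ∈ s := hcomp q h c' (fun d hd => hle' d (by simp [hd])) hQ
      have hqkeep : q ∈ s.dropWhile (fun q => ! prefQ c q) := by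
        have hsplit := List.takeWhile_append_dropWhile (p := fun q => ! prefQ c q) (l := s)
        rcases List.mem_append.mp (by rw [hsplit]; exact hqs) with htk | hdk
        · exfalso
          have hfail := List.mem_takeWhile_imp htk
          simp only [Bool.not_eq_eq_eq_not, Bool.not_true] at hfail
          have hQc : prefQ c q = true := by
            simp only [prefQ, decide_eq_true_eq] at hQ ⊢
            exact ⟨hQ.1, prefix_of_le_le q.2 c c' hQ.2 (hle q.2 (hdone q h)) hcc'⟩
          simp [hQc] at hfail
        · exact hdk
      exact List.mem_append.mpr (Or.inr hqkeep)
    · -- q is the new element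
      cases appnd with
      | false => simp at h
      | true =>
        simp only [if_true] at h
        have hq' : q = (a, c) := by simpa using h
        subst hq'
        cases push with
        | true => simp
        | false =>
          exfalso
          have : c = [] := h2 rfl rfl
          simp only [prefQ, decide_eq_true_eq] at hQ
          exact hQ.1 this

-- B's prefix test agrees with A's chained comparison (the length test is implied by the prefix)
theorem isNonemptyPrefixB_eq (c : List Int) (q : Int × List Int) :
    isNonemptyPrefixB q.2 c = prefQ c q := by
  simp only [isNonemptyPrefixB, prefQ, PySem.List.slice_zero_start, PySem.List.slice_to_natCast]
  rw [Bool.eq_iff_iff]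
  simp only [Bool.and_eq_true, decide_eq_true_eq, beq_iff_eq]
  constructor
  · rintro ⟨h2, h3⟩
    exact ⟨by intro h; simp [h] at h2, List.prefix_iff_eq_take.mpr h3.symm⟩
  · rintro ⟨h1, h2⟩
    exact ⟨by simpa [List.length_pos_iff] using h1, (List.prefix_iff_eq_take.mp h2).symm⟩

-- pass 1: A's backward cache scan and B's stack produce the same hit counter
theorem pass1_fold_eq (circuits : List (List Int)) :
    ∀ (rest done stB : List (Int × List Int)) (hits : PySem.Dict Int Int),
    (∀ q ∈ done ++ rest, PySem.List.pyGet? circuits q.1 = some q.2) →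
    (((done ++ rest).map Prod.fst).Nodup) →
    ((done ++ rest).Pairwise (fun a b => a.2 ≤ b.2)) →
    StackInv (done.map Prod.snd) done stB →
    (rest.foldl (fun st p =>
        let hits := match pass1ScanA circuits st.1 p.2 with
          | some cached_index => st.2.modify cached_index 0 (· + 1)
          | none => st.2
        (st.1 ++ [p.1], hits)) (done.map Prod.fst, hits)).2 =
    (rest.foldl (fun (st : List (Int × List Int) × PySem.Dict Int Int) p =>
        let stack := popB st.1 p.2
        let hits := match stack with
          | q :: _ => st.2.insert q.1 (st.2.getD q.1 0 + 1)
          | [] => st.2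
        (if p.2.isEmpty then stack else (p.1, p.2) :: stack, hits)) (stB, hits)).2 := by
  intro rest
  induction rest with
  | nil => intros; rfl
  | cons p rest ih =>
    intro done stB hits hmem hnd hpw hinv
    have hnd_done : done.Nodup :=
      List.Nodup.of_map Prod.fst ((List.map_append ▸ hnd).sublist (List.sublist_append_left _ _))
    have hle : ∀ d ∈ done.map Prod.snd, d ≤ p.2 := by
      intro d hd
      obtain ⟨q, hq, rfl⟩ := List.mem_map.mp hd
      exact (List.pairwise_append.mp hpw).2.2 q hq p (by simp)
    have hfindA : pass1ScanA circuits (done.map Prod.fst) p.2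
        = (done.reverse.find? (prefQ p.2)).map Prod.fst := by
      unfold pass1ScanA
      rw [← List.map_reverse, List.find?_map]
      congr 1
      refine find?_congr_mem (fun q hq => ?_)
      have : PySem.List.pyGet? circuits q.1 = some q.2 :=
        hmem q (List.mem_append.mpr (Or.inl (List.mem_reverse.mp hq)))
      simp only [Function.comp_apply, this, Option.getD_some]
      exact condA_eq p.2 q.2
    have hpopf : popB stB p.2 = stB.dropWhile (fun q => ! prefQ p.2 q) := by
      unfold popB
      congr 1
      funext q
      rw [isNonemptyPrefixB_eq]
    have hhead : (popB stB p.2).head? = done.reverse.find? (prefQ p.2) := by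
      rw [hpopf, ← List.find?_eq_head?_dropWhile_not]
      exact stackInv_find _ _ _ _ hinv hnd_done hle
    have hstep := stackInv_step (done.map Prod.snd) done stB p.1 p.2 true (!p.2.isEmpty)
      hinv hle (fun _ => rfl) (fun _ h => by simpa using h)
    rw [← hpopf] at hstep
    have hinv' : StackInv ((done ++ [p]).map Prod.snd) (done ++ [p])
        (if p.2.isEmpty then popB stB p.2 else (p.1, p.2) :: popB stB p.2) := by
      simp only [if_true, List.map_append] at hstep ⊢
      cases hb : p.2.isEmpty <;> simp [hb] at hstep ⊢ <;> exact hstep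
    rw [List.append_cons] at hmem hnd hpw
    simp only [List.foldl_cons]
    rcases ho : done.reverse.find? (prefQ p.2) with _ | q
    · have hpop_nil : popB stB p.2 = [] :=
        List.head?_eq_none_iff.mp (ho ▸ hhead)
      rw [hpop_nil] at hinv'
      have := ih (done ++ [p])
        (if p.2.isEmpty then [] else [(p.1, p.2)]) hits hmem hnd hpw
        (by cases hb : p.2.isEmpty <;> simpa [hb] using hinv')
      simp only [List.map_append] at this
      simpa [hfindA, ho, hpop_nil] using this
    · obtain ⟨t, ht⟩ := List.head?_eq_some_iff.mp (ho ▸ hhead)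
      rw [ht] at hinv'
      have := ih (done ++ [p])
        (if p.2.isEmpty then q :: t else (p.1, p.2) :: q :: t)
        (hits.insert q.1 (hits.getD q.1 0 + 1)) hmem hnd hpw
        (by cases hb : p.2.isEmpty <;> simpa [hb] using hinv')
      simp only [List.map_append] at this
      simpa [hfindA, ho, ht, PySem.Dict.modify] using this


def cachedOf (circuits : List (List Int)) (cacheIndices : List Int) : List (Int × List Int) :=
  (PySem.List.enumerate cacheIndices 0).map
    (fun pi => (pi.1, (PySem.List.pyGet? circuits pi.2).getD []))

theorem findSome?_congr_mem {α β : Type} {l : List α} {f g : α → Option β}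
    (h : ∀ x ∈ l, f x = g x) : l.findSome? f = l.findSome? g := by
  induction l with
  | nil => rfl
  | cons x xs ih =>
    simp only [List.findSome?_cons]
    rw [h x (by simp)]
    cases g x
    · exact ih (fun y hy => h y (by simp [hy]))
    · rfl

theorem cachedOf_fst (circuits : List (List Int)) (ci : List Int) :
    (cachedOf circuits ci).map Prod.fst = (PySem.List.enumerate ci 0).map Prod.fst := by
  simp [cachedOf, List.map_map, Function.comp_def]

theorem cachedOf_nodup (circuits : List (List Int)) (ci : List Int) :
    (cachedOf circuits ci).Nodup := by
  refine List.Nodup.of_map Prod.fst ?_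
  rw [cachedOf_fst, PySem.List.map_fst_enumerate]
  exact PySem.List.nodup_pyRange_one _ _

theorem cachedOf_append (circuits : List (List Int)) (ci : List Int) (i : Int) :
    cachedOf circuits (ci ++ [i]) =
      cachedOf circuits ci ++ [((ci.length : Int), (PySem.List.pyGet? circuits i).getD [])] := by
  simp [cachedOf, PySem.List.enumerate_append, PySem.List.enumerate_cons]

-- A's pass-2 scan, rephrased as a find? over the cached (position, circuit) pairs
theorem findPrefixA_eq (circuits : List (List Int)) (ci : List Int) (c : List Int) :
    findPrefixA circuits ci (ci.length : Int) c =
      ((cachedOf circuits ci).reverse.find? (prefQ c)).map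
        (fun q => (q.1, PySem.List.slice c (some (q.2.length : Int)) none)) := by
  unfold findPrefixA
  rw [PySem.List.pyRange_neg_one_eq_reverse]
  have h0 : PySem.List.pyRange (-1 + 1) ((ci.length : Int) - 1 + 1) = PySem.List.pyRange 0 (ci.length : Int) := by norm_num
  rw [h0]
  have h1 : PySem.List.pyRange 0 (ci.length : Int) = (PySem.List.enumerate ci 0).map Prod.fst := by
    rw [PySem.List.map_fst_enumerate]; norm_num
  rw [h1, ← List.map_reverse, List.findSome?_map]
  have h2 : ∀ pi ∈ (PySem.List.enumerate ci 0).reverse,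
      ((fun i_in_cache =>
        if condA c ((PySem.List.pyGet? circuits ((PySem.List.pyGet? ci i_in_cache).getD 0)).getD []) then
          some (i_in_cache, PySem.List.slice c (some ((((PySem.List.pyGet? circuits ((PySem.List.pyGet? ci i_in_cache).getD 0)).getD []).length : Int))) none)
        else none) ∘ Prod.fst) pi =
      ((fun q => if prefQ c q then some (q.1, PySem.List.slice c (some ((q.2.length : Int))) none) else none) ∘
        (fun pi => (pi.1, (PySem.List.pyGet? circuits pi.2).getD []))) pi := by
    intro pi hpi
    obtain ⟨k, hk, rfl⟩ := (PySem.List.mem_enumerate_iff _ _ _).mp (List.mem_reverse.mp hpi)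
    have hget : PySem.List.pyGet? ci (0 + (k : Int)) = some ci[k] := by
      simp [hk]
    simp only [Function.comp_apply, hget, Option.getD_some]
    rw [condA_eq]
    rfl
  rw [findSome?_congr_mem h2, ← List.findSome?_map, List.map_reverse]
  exact findSome?_if_eq_find?_map _ _ _

-- pass 2: A's backward scan over cached positions and B's stack build identical tables
theorem pass2_fold_eq (circuits : List (List Int)) (mcs : Option Int) (hits : PySem.Dict Int Int) :
    ∀ (rest done : List (Int × List Int)) (cacheIndices : List Int)
      (stB : List (Int × List Int)) (table : List (Int × Option Int × List Int × Option Int)),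
    (∀ q ∈ done ++ rest, PySem.List.pyGet? circuits q.1 = some q.2) →
    (((done ++ rest).map Prod.fst).Nodup) →
    ((done ++ rest).Pairwise (fun a b => a.2 ≤ b.2)) →
    StackInv (done.map Prod.snd) (cachedOf circuits cacheIndices) stB →
    (rest.foldl (fun (st : List Int × List (Int × Option Int × List Int × Option Int) × Int) p =>
        let (iStart, remaining) := match findPrefixA circuits st.1 st.2.2 p.2 with
          | some sr => (some sr.1, sr.2)
          | none => ((none : Option Int), PySem.List.slice p.2 none none)
        if cacheRoomA mcs st.2.2 && decide (hits.getD p.1 0 > 0) then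
          (st.1 ++ [p.1], st.2.1 ++ [(p.1, iStart, remaining, some (st.1.length : Int))], st.2.2 + 1)
        else
          (st.1, st.2.1 ++ [(p.1, iStart, remaining, none)], st.2.2))
      (cacheIndices, table, (cacheIndices.length : Int))).2 =
    (rest.foldl (fun (st : List (Int × List Int) × List (Int × Option Int × List Int × Option Int) × Int) p =>
        let stack := popB st.1 p.2
        let (iStart, remaining) := match stack with
          | q :: _ => (some q.1, PySem.List.slice p.2 (some (q.2.length : Int)) none)
          | [] => ((none : Option Int), p.2)
        if cacheRoomB mcs st.2.2 && decide (hits.getD p.1 0 > 0) then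
          ((st.2.2, p.2) :: stack, st.2.1 ++ [(p.1, iStart, remaining, some st.2.2)], st.2.2 + 1)
        else
          (stack, st.2.1 ++ [(p.1, iStart, remaining, none)], st.2.2))
      (stB, table, (cacheIndices.length : Int))).2 := by
  intro rest
  induction rest with
  | nil => intros; rfl
  | cons p rest ih =>
    intro done cacheIndices stB table hmem hnd hpw hinv
    have hle : ∀ d ∈ done.map Prod.snd, d ≤ p.2 := by
      intro d hd
      obtain ⟨q, hq, rfl⟩ := List.mem_map.mp hd
      exact (List.pairwise_append.mp hpw).2.2 q hq p (by simp)
    have hfind := findPrefixA_eq circuits cacheIndices p.2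
    have hpopf : popB stB p.2 = stB.dropWhile (fun q => ! prefQ p.2 q) := by
      unfold popB
      congr 1
      funext q
      rw [isNonemptyPrefixB_eq]
    have hhead : (popB stB p.2).head? = (cachedOf circuits cacheIndices).reverse.find? (prefQ p.2) := by
      rw [hpopf, ← List.find?_eq_head?_dropWhile_not]
      exact stackInv_find _ _ _ _ hinv (cachedOf_nodup _ _) hle
    have hmemp : PySem.List.pyGet? circuits p.1 = some p.2 := hmem p (by simp)
    rw [List.append_cons] at hmem hnd hpw
    simp only [List.foldl_cons]
    have hBA : cacheRoomB = cacheRoomA := rfl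
    rw [hBA]
    cases hcond : cacheRoomA mcs (cacheIndices.length : Int) && decide (hits.getD p.1 0 > 0)
    case true =>
      have hcond' : (cacheRoomA mcs (cacheIndices.length : Int) = true ∧ 0 < hits.getD p.1 0) := by
        simpa using hcond
      -- this circuit is cached: both sides push it
      have hstep := stackInv_step (done.map Prod.snd) (cachedOf circuits cacheIndices) stB
        ((cacheIndices.length : Int)) p.2 true true hinv hle (fun _ => rfl) (fun _ h => nomatch h)
      rw [← hpopf] at hstep
      have hinv' : StackInv ((done ++ [p]).map Prod.snd) (cachedOf circuits (cacheIndices ++ [p.1]))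
          (((cacheIndices.length : Int), p.2) :: popB stB p.2) := by
        rw [cachedOf_append, hmemp]
        simpa [List.map_append] using hstep
      rcases ho : (cachedOf circuits cacheIndices).reverse.find? (prefQ p.2) with _ | q
      · have hpop_nil : popB stB p.2 = [] := List.head?_eq_none_iff.mp (ho ▸ hhead)
        rw [hpop_nil] at hinv'
        have := ih (done ++ [p]) (cacheIndices ++ [p.1])
          [((cacheIndices.length : Int), p.2)]
          (table ++ [(p.1, none, PySem.List.slice p.2 none none, some (cacheIndices.length : Int))])
          hmem hnd hpw hinv'
        simp only [List.length_append, List.length_cons, List.length_nil] at this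
        push_cast at this
        simpa [hfind, ho, hcond', hpop_nil, PySem.List.slice_none_none] using this
      · obtain ⟨t, ht⟩ := List.head?_eq_some_iff.mp (ho ▸ hhead)
        rw [ht] at hinv'
        have := ih (done ++ [p]) (cacheIndices ++ [p.1])
          (((cacheIndices.length : Int), p.2) :: q :: t)
          (table ++ [(p.1, some q.1, PySem.List.slice p.2 (some (q.2.length : Int)) none, some (cacheIndices.length : Int))])
          hmem hnd hpw hinv'
        simp only [List.length_append, List.length_cons, List.length_nil] at this
        push_cast at this
        simpa [hfind, ho, hcond', ht] using this
    case false =>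
      have hcond' : ¬ (cacheRoomA mcs (cacheIndices.length : Int) = true ∧ 0 < hits.getD p.1 0) := by
        simpa using hcond
      -- not cached: the cache is unchanged, B keeps the popped stack
      have hstep := stackInv_step (done.map Prod.snd) (cachedOf circuits cacheIndices) stB
        0 p.2 false false hinv hle (fun h => nomatch h) (fun h => nomatch h)
      rw [← hpopf] at hstep
      have hinv' : StackInv ((done ++ [p]).map Prod.snd) (cachedOf circuits cacheIndices)
          (popB stB p.2) := by
        simpa [List.map_append] using hstep
      rcases ho : (cachedOf circuits cacheIndices).reverse.find? (prefQ p.2) with _ | q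
      · have hpop_nil : popB stB p.2 = [] := List.head?_eq_none_iff.mp (ho ▸ hhead)
        rw [hpop_nil] at hinv'
        have := ih (done ++ [p]) cacheIndices []
          (table ++ [(p.1, none, PySem.List.slice p.2 none none, none)])
          hmem hnd hpw hinv'
        simpa [hfind, ho, hcond', hpop_nil, PySem.List.slice_none_none] using this
      · obtain ⟨t, ht⟩ := List.head?_eq_some_iff.mp (ho ▸ hhead)
        rw [ht] at hinv'
        have := ih (done ++ [p]) cacheIndices (q :: t)
          (table ++ [(p.1, some q.1, PySem.List.slice p.2 (some (q.2.length : Int)) none, none)])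
          hmem hnd hpw hinv'
        simpa [hfind, ho, hcond', ht] using this


-- ===== VERDICT (by name: the statement is the Claim_ definition above) =====
theorem create_prefix_table_py_spec : Claim_equal_create_prefix_table_py := by
  intro circuits mcs _hdom
  unfold Spec_create_prefix_table_py create_prefix_table_py create_prefix_table_py_alt
  have hperm : (PySem.List.sorted (PySem.List.enumerate circuits 0) (fun x => x.2) false).Perm
      (PySem.List.enumerate circuits 0) := PySem.List.sorted_perm _ _ _
  set ss := PySem.List.sorted (PySem.List.enumerate circuits 0) (fun x => x.2) false with hss
  have hmem : ∀ q ∈ ss, PySem.List.pyGet? circuits q.1 = some q.2 := by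
    intro q hq
    obtain ⟨k, hk, rfl⟩ := (PySem.List.mem_enumerate_iff _ _ _).mp (hperm.mem_iff.mp hq)
    simp [hk]
  have hnd : (ss.map Prod.fst).Nodup := by
    refine ((hperm.map Prod.fst).nodup_iff).mpr ?_
    rw [PySem.List.map_fst_enumerate]
    exact PySem.List.nodup_pyRange_one _ _
  have hpw : ss.Pairwise (fun a b => a.2 ≤ b.2) := by
    rw [hss]
    have h := PySem.List.sorted_pairwise (κ := List Int) (PySem.List.enumerate circuits 0)
      (fun x : Int × List Int => x.2)
    convert h using 2
  have hinv0 : StackInv (([] : List (Int × List Int)).map Prod.snd) [] [] :=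
    ⟨List.nil_sublist _, by simp, by simp⟩
  have h1 : cacheHitsA circuits mcs ss = cacheHitsB mcs ss := by
    have hloop := pass1_fold_eq circuits ss [] [] PySem.Dict.empty
      (by simpa using hmem) (by simpa using hnd) (by simpa using hpw) hinv0
    simp only [List.map_nil] at hloop
    unfold cacheHitsA cacheHitsB cacheHitsLoopA pass1B
    cases mcs with
    | none => exact hloop
    | some m =>
      by_cases hm : 0 < m
      · simp only [if_pos hm]; exact hloop
      · simp only [if_neg hm]
  have hinv0' : StackInv (([] : List (Int × List Int)).map Prod.snd)
      (cachedOf circuits []) [] := ⟨List.nil_sublist _, by simp [cachedOf], by simp [cachedOf]⟩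
  have h2 := pass2_fold_eq circuits mcs (cacheHitsB mcs ss) ss [] [] [] []
    (by simpa using hmem) (by simpa using hnd) (by simpa using hpw) hinv0'
  simp only [List.length_nil, Nat.cast_zero] at h2
  simp only []
  rw [h1]
  exact Prod.ext (congrArg Prod.fst h2) (congrArg Prod.snd h2)
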